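-- pv_equiv track=rewrite | github.com/EeeMoon/weneda | tests/utils.py | format_amount
-- ===== SOURCE A (Python) =====
-- def format_amount(value: int,
--                   first_form: str,
--                   second_form: str,
--                   third_form: str):
--     if value < 0:
--         value = value * (-1)
--
--     string = str(value)
--
--     if (value == 1):
--         return first_form
--
--     for i in range(19, -1, -1):
--         if (i >= 2 and i <= 4):
--             if (string.endswith(str(i))):
--                 return second_form
--
--         if (string.endswith(str(i))):
--             return third_form
-- ===== SOURCE B (Python) =====
-- def format_amount(value: int,
--                   first_form: str,
--                   second_form: str,
--                   third_form: str):
--     v = -value if value < 0 else value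
--     if v == 1:
--         return first_form
--     last_two = v % 100
--     if 10 <= last_two <= 19:
--         return third_form
--     return second_form if v % 10 in (2, 3, 4) else third_form
-- ===== Notes on version B (the rewrite author's own statement) =====
-- stated objective: simpler
-- what changed: Replaces the descending 20-step range loop over string-suffix endswith tests with direct last-digit arithmetic: v % 100 for the 10-19 teens case, then v % 10 for choosing second vs third form.
import Mathlib
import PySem

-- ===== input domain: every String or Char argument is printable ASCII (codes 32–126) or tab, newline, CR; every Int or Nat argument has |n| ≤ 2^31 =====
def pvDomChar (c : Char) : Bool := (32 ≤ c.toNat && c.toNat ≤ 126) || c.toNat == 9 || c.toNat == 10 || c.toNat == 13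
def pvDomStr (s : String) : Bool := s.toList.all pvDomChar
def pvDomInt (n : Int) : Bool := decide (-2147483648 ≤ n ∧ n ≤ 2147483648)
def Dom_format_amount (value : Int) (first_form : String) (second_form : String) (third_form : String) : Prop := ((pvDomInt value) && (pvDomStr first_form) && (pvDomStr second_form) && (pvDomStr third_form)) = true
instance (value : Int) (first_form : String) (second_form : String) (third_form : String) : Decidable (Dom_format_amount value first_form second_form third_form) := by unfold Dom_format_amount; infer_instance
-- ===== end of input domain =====

-- ===== PORT A =====
-- B replaces A's descending range(19,-1,-1) loop of string-suffix tests with direct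
-- last-digit arithmetic (v % 100 / v % 10); return values proved equal on all inputs.
-- A-side helper: the 'for i in range(19, -1, -1)' loop; 'none' = the loop fell through
-- (Python's implicit None — unreachable, since every decimal string ends in a digit 0-9).
def faLoop (string : String) (second_form : String) (third_form : String) : List Int → Option String
  | [] => none
  | i :: rest =>
    if 2 ≤ i ∧ i ≤ 4 then
      if PySem.Str.endswith string (PySem.Int.toStr i) then some second_form
      else if PySem.Str.endswith string (PySem.Int.toStr i) then some third_form
      else faLoop string second_form third_form rest
    else if PySem.Str.endswith string (PySem.Int.toStr i) then some third_form
    else faLoop string second_form third_form rest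

def format_amount (value : Int) (first_form : String) (second_form : String) (third_form : String) : String :=
  let value := if value < 0 then value * (-1) else value
  let string := PySem.Int.toStr value
  if value == 1 then first_form
  else
    -- the loop always hits a digit; '.getD ""' only totalises the unreachable fall-through
    (faLoop string second_form third_form (PySem.List.pyRange 19 (-1) (-1))).getD ""

-- ===== PORT B =====
def format_amount_alt (value : Int) (first_form : String) (second_form : String) (third_form : String) : String :=
  let v := if value < 0 then -value else value
  if v == 1 then first_form
  else
    let lastTwo := PySem.Int.mod v 100
    if 10 ≤ lastTwo ∧ lastTwo ≤ 19 then third_form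
    else
      let d := PySem.Int.mod v 10
      if d == 2 || d == 3 || d == 4 then second_form else third_form

-- ===== PRECONDITION & SPEC =====
def Spec_format_amount (value : Int) (first_form : String) (second_form : String) (third_form : String) (out : String) : Prop := out = format_amount_alt value first_form second_form third_form
instance (value : Int) (first_form : String) (second_form : String) (third_form : String) (out : String) : Decidable (Spec_format_amount value first_form second_form third_form out) := by unfold Spec_format_amount; infer_instance

-- ===== CLAIM (what is proved, stated in full; the proofs are below) =====
def Claim_equal_format_amount : Prop := ∀ (value : Int) (first_form : String) (second_form : String) (third_form : String), Dom_format_amount value first_form second_form third_form → Spec_format_amount value first_form second_form third_form (format_amount value first_form second_form third_form)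

-- ===== LEMMAS AND PROOFS =====

lemma tdc_shift : ∀ (fuel n : Nat) (ds : List Char),
    Nat.toDigitsCore 10 fuel n ds = Nat.toDigitsCore 10 fuel n [] ++ ds := by
  intro fuel
  induction fuel with
  | zero => intro n ds; simp [Nat.toDigitsCore]
  | succ f ih =>
    intro n ds
    simp only [Nat.toDigitsCore]
    by_cases h : n / 10 = 0
    · simp [h]
    · simp only [h]
      rw [ih (n/10) (Nat.digitChar (n % 10) :: ds), ih (n/10) [Nat.digitChar (n % 10)]]
      simp

lemma tdc_fuel : ∀ (n f1 f2 : Nat), n < f1 → n < f2 →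
    Nat.toDigitsCore 10 f1 n [] = Nat.toDigitsCore 10 f2 n [] := by
  intro n
  induction n using Nat.strong_induction_on with
  | _ n ih =>
    intro f1 f2 h1 h2
    match f1, f2 with
    | k1+1, k2+1 =>
      simp only [Nat.toDigitsCore]
      by_cases h : n / 10 = 0
      · simp [h]
      · simp only [h]
        rw [tdc_shift k1, tdc_shift k2]
        have hn : 0 < n := by omega
        have hd : n / 10 < n := Nat.div_lt_self hn (by norm_num)
        rw [ih (n/10) hd k1 k2 (by omega) (by omega)]

lemma toDigits_step (n : Nat) (h : 10 ≤ n) :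
    Nat.toDigits 10 n = Nat.toDigits 10 (n / 10) ++ [Nat.digitChar (n % 10)] := by
  have h0 : ¬ (n / 10 = 0) := by omega
  rw [Nat.toDigits,
      show Nat.toDigitsCore 10 (n+1) n [] = Nat.toDigitsCore 10 n (n/10) [Nat.digitChar (n%10)] from by
        rw [Nat.toDigitsCore]; simp only [h0, if_false],
      tdc_shift, Nat.toDigits, tdc_fuel (n/10) n (n/10+1) (by omega) (by omega)]

lemma suffix_concat_concat {α : Type} (a b : List α) (x y : α) :
    (a ++ [x] <:+ b ++ [y]) ↔ (a <:+ b ∧ x = y) := by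
  rw [← List.reverse_prefix]
  simp [List.cons_prefix_cons, List.reverse_prefix, and_comm]


lemma toDigits_small (n : Nat) (h : n < 10) : Nat.toDigits 10 n = [Nat.digitChar n] := by
  simp [Nat.toDigits, Nat.toDigitsCore, Nat.div_eq_of_lt h, Nat.mod_eq_of_lt h]

lemma suffix_single_digits (n : Nat) (c : Char) :
    ([c] <:+ Nat.toDigits 10 n) ↔ c = Nat.digitChar (n % 10) := by
  by_cases h : n < 10
  · rw [toDigits_small n h, Nat.mod_eq_of_lt h]
    simp [List.suffix_cons_iff]
  · rw [toDigits_step n (by omega),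
        show [c] = [] ++ [c] from rfl, suffix_concat_concat]
    simp

lemma suffix_pair_digits (n : Nat) (c1 c2 : Char) :
    ([c1, c2] <:+ Nat.toDigits 10 n) ↔
      (10 ≤ n ∧ c1 = Nat.digitChar (n / 10 % 10) ∧ c2 = Nat.digitChar (n % 10)) := by
  by_cases h : n < 10
  · rw [toDigits_small n h]
    constructor
    · intro hs; have := hs.length_le; simp at this
    · rintro ⟨h10, -, -⟩; omega
  · rw [toDigits_step n (by omega),
        show [c1, c2] = [c1] ++ [c2] from rfl, suffix_concat_concat,
        suffix_single_digits]
    have h10 : 10 ≤ n := by omega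
    tauto

lemma digitChar_inj : ∀ a < 10, ∀ b < 10, (Nat.digitChar a = Nat.digitChar b ↔ a = b) := by decide

lemma toChars_natCast (n : Nat) : PySem.Int.toChars (n : Int) = Nat.toDigits 10 n := by
  simp [PySem.Int.toChars]

lemma strends_small (n : Nat) (i : Int) (h0 : 0 ≤ i) (h : i < 10) :
    PySem.Str.endswith (PySem.Int.toStr (n : Int)) (PySem.Int.toStr i)
      = decide (((n % 10 : Nat) : Int) = i) := by
  obtain ⟨d, rfl⟩ : ∃ d : Nat, i = (d : Int) := ⟨i.toNat, (Int.toNat_of_nonneg h0).symm⟩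
  have hd : d < 10 := by omega
  rw [Bool.eq_iff_iff]
  simp only [PySem.Str.endswith_eq, PySem.Int.toList_toStr, toChars_natCast,
    PySem.Chars.endswith_iff, decide_eq_true_eq]
  rw [toDigits_small d hd, suffix_single_digits,
      digitChar_inj d hd (n % 10) (Nat.mod_lt n (by omega))]
  omega

lemma strends_teen (n : Nat) (i : Int) (h0 : 10 ≤ i) (h : i < 100) :
    PySem.Str.endswith (PySem.Int.toStr (n : Int)) (PySem.Int.toStr i)
      = decide (((n % 100 : Nat) : Int) = i) := by
  obtain ⟨d, rfl⟩ : ∃ d : Nat, i = (d : Int) := ⟨i.toNat, (Int.toNat_of_nonneg (by omega)).symm⟩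
  have hd1 : 10 ≤ d := by omega
  have hd2 : d < 100 := by omega
  rw [Bool.eq_iff_iff]
  simp only [PySem.Str.endswith_eq, PySem.Int.toList_toStr, toChars_natCast,
    PySem.Chars.endswith_iff, decide_eq_true_eq]
  rw [toDigits_step d hd1, toDigits_small (d/10) (by omega)]
  simp only [List.singleton_append]
  rw [suffix_pair_digits]
  rw [digitChar_inj (d/10) (by omega) (n / 10 % 10) (by omega),
      digitChar_inj (d % 10) (by omega) (n % 10) (by omega)]
  omega

lemma faLoop_hit_s (string s t : String) (i : Int) (rest : List Int) (h24 : 2 ≤ i ∧ i ≤ 4)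
    (he : PySem.Str.endswith string (PySem.Int.toStr i) = true) :
    faLoop string s t (i :: rest) = some s := by
  simp only [faLoop]
  rw [if_pos h24, if_pos he]

lemma faLoop_hit_t (string s t : String) (i : Int) (rest : List Int) (h24 : ¬ (2 ≤ i ∧ i ≤ 4))
    (he : PySem.Str.endswith string (PySem.Int.toStr i) = true) :
    faLoop string s t (i :: rest) = some t := by
  simp only [faLoop]
  rw [if_neg h24, if_pos he]

lemma faLoop_skip (string s t : String) (xs ys : List Int)
    (h : ∀ i ∈ xs, PySem.Str.endswith string (PySem.Int.toStr i) = false) :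
    faLoop string s t (xs ++ ys) = faLoop string s t ys := by
  induction xs with
  | nil => rfl
  | cons i xs ih =>
    have hi := h i (by simp)
    simp only [List.cons_append, faLoop, hi, Bool.false_eq_true, if_false, ite_self]
    exact ih fun j hj => h j (by simp [hj])

lemma strends_eval (n : Nat) (i : Int) (h0 : 0 ≤ i) (h : i < 100) :
    PySem.Str.endswith (PySem.Int.toStr (n : Int)) (PySem.Int.toStr i)
      = decide (((if 10 ≤ i then (n % 100 : Nat) else (n % 10 : Nat)) : Int) = i) := by
  by_cases hi : 10 ≤ i
  · rw [strends_teen n i hi h, if_pos hi]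
  · rw [strends_small n i h0 (by omega), if_neg hi]

set_option maxHeartbeats 1000000 in
lemma loop_eval (n : Nat) (s t : String) :
    faLoop (PySem.Int.toStr (n : Int)) s t (PySem.List.pyRange 19 (-1) (-1)) =
      some (if 10 ≤ n % 100 ∧ n % 100 ≤ 19 then t
            else if n % 10 = 2 ∨ n % 10 = 3 ∨ n % 10 = 4 then s else t) := by
  rw [show PySem.List.pyRange 19 (-1) (-1) =
      [19, 18, 17, 16, 15, 14, 13, 12, 11, 10, 9, 8, 7, 6, 5, 4, 3, 2, 1, 0] from by decide]
  by_cases hteen : 10 ≤ n % 100 ∧ n % 100 ≤ 19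
  · have hc : n % 100 = 19 ∨ n % 100 = 18 ∨ n % 100 = 17 ∨ n % 100 = 16 ∨ n % 100 = 15 ∨ n % 100 = 14 ∨ n % 100 = 13 ∨ n % 100 = 12 ∨ n % 100 = 11 ∨ n % 100 = 10 := by omega
    rcases hc with h|h|h|h|h|h|h|h|h|h
    · have hskip : ∀ i ∈ ([] : List Int),
          PySem.Str.endswith (PySem.Int.toStr (n : Int)) (PySem.Int.toStr i) = false := by
        intro i hi
        exact absurd hi (by simp)
      have hhit : PySem.Str.endswith (PySem.Int.toStr (n : Int)) (PySem.Int.toStr (19 : Int)) = true := by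
        rw [strends_eval n 19 (by norm_num) (by norm_num)]; simp only [decide_eq_true_eq]; split_ifs <;> omega
      rw [show ([19, 18, 17, 16, 15, 14, 13, 12, 11, 10, 9, 8, 7, 6, 5, 4, 3, 2, 1, 0] : List Int) = [] ++ ((19 : Int) :: [18, 17, 16, 15, 14, 13, 12, 11, 10, 9, 8, 7, 6, 5, 4, 3, 2, 1, 0]) from rfl,
          faLoop_skip _ _ _ _ _ hskip, faLoop_hit_t _ _ _ _ _ (by norm_num) hhit, if_pos (by omega)]
    · have hskip : ∀ i ∈ ([19] : List Int),
          PySem.Str.endswith (PySem.Int.toStr (n : Int)) (PySem.Int.toStr i) = false := by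
        intro i hi
        fin_cases hi
        · rw [strends_eval n _ (by norm_num) (by norm_num)]
          simp only [decide_eq_false_iff_not]
          split_ifs <;> omega
      have hhit : PySem.Str.endswith (PySem.Int.toStr (n : Int)) (PySem.Int.toStr (18 : Int)) = true := by
        rw [strends_eval n 18 (by norm_num) (by norm_num)]; simp only [decide_eq_true_eq]; split_ifs <;> omega
      rw [show ([19, 18, 17, 16, 15, 14, 13, 12, 11, 10, 9, 8, 7, 6, 5, 4, 3, 2, 1, 0] : List Int) = [19] ++ ((18 : Int) :: [17, 16, 15, 14, 13, 12, 11, 10, 9, 8, 7, 6, 5, 4, 3, 2, 1, 0]) from rfl,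
          faLoop_skip _ _ _ _ _ hskip, faLoop_hit_t _ _ _ _ _ (by norm_num) hhit, if_pos (by omega)]
    · have hskip : ∀ i ∈ ([19, 18] : List Int),
          PySem.Str.endswith (PySem.Int.toStr (n : Int)) (PySem.Int.toStr i) = false := by
        intro i hi
        fin_cases hi <;>
          · rw [strends_eval n _ (by norm_num) (by norm_num)]
            simp only [decide_eq_false_iff_not]
            split_ifs <;> omega
      have hhit : PySem.Str.endswith (PySem.Int.toStr (n : Int)) (PySem.Int.toStr (17 : Int)) = true := by
        rw [strends_eval n 17 (by norm_num) (by norm_num)]; simp only [decide_eq_true_eq]; split_ifs <;> omega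
      rw [show ([19, 18, 17, 16, 15, 14, 13, 12, 11, 10, 9, 8, 7, 6, 5, 4, 3, 2, 1, 0] : List Int) = [19, 18] ++ ((17 : Int) :: [16, 15, 14, 13, 12, 11, 10, 9, 8, 7, 6, 5, 4, 3, 2, 1, 0]) from rfl,
          faLoop_skip _ _ _ _ _ hskip, faLoop_hit_t _ _ _ _ _ (by norm_num) hhit, if_pos (by omega)]
    · have hskip : ∀ i ∈ ([19, 18, 17] : List Int),
          PySem.Str.endswith (PySem.Int.toStr (n : Int)) (PySem.Int.toStr i) = false := by
        intro i hi
        fin_cases hi <;>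
          · rw [strends_eval n _ (by norm_num) (by norm_num)]
            simp only [decide_eq_false_iff_not]
            split_ifs <;> omega
      have hhit : PySem.Str.endswith (PySem.Int.toStr (n : Int)) (PySem.Int.toStr (16 : Int)) = true := by
        rw [strends_eval n 16 (by norm_num) (by norm_num)]; simp only [decide_eq_true_eq]; split_ifs <;> omega
      rw [show ([19, 18, 17, 16, 15, 14, 13, 12, 11, 10, 9, 8, 7, 6, 5, 4, 3, 2, 1, 0] : List Int) = [19, 18, 17] ++ ((16 : Int) :: [15, 14, 13, 12, 11, 10, 9, 8, 7, 6, 5, 4, 3, 2, 1, 0]) from rfl,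
          faLoop_skip _ _ _ _ _ hskip, faLoop_hit_t _ _ _ _ _ (by norm_num) hhit, if_pos (by omega)]
    · have hskip : ∀ i ∈ ([19, 18, 17, 16] : List Int),
          PySem.Str.endswith (PySem.Int.toStr (n : Int)) (PySem.Int.toStr i) = false := by
        intro i hi
        fin_cases hi <;>
          · rw [strends_eval n _ (by norm_num) (by norm_num)]
            simp only [decide_eq_false_iff_not]
            split_ifs <;> omega
      have hhit : PySem.Str.endswith (PySem.Int.toStr (n : Int)) (PySem.Int.toStr (15 : Int)) = true := by
        rw [strends_eval n 15 (by norm_num) (by norm_num)]; simp only [decide_eq_true_eq]; split_ifs <;> omega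
      rw [show ([19, 18, 17, 16, 15, 14, 13, 12, 11, 10, 9, 8, 7, 6, 5, 4, 3, 2, 1, 0] : List Int) = [19, 18, 17, 16] ++ ((15 : Int) :: [14, 13, 12, 11, 10, 9, 8, 7, 6, 5, 4, 3, 2, 1, 0]) from rfl,
          faLoop_skip _ _ _ _ _ hskip, faLoop_hit_t _ _ _ _ _ (by norm_num) hhit, if_pos (by omega)]
    · have hskip : ∀ i ∈ ([19, 18, 17, 16, 15] : List Int),
          PySem.Str.endswith (PySem.Int.toStr (n : Int)) (PySem.Int.toStr i) = false := by
        intro i hi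
        fin_cases hi <;>
          · rw [strends_eval n _ (by norm_num) (by norm_num)]
            simp only [decide_eq_false_iff_not]
            split_ifs <;> omega
      have hhit : PySem.Str.endswith (PySem.Int.toStr (n : Int)) (PySem.Int.toStr (14 : Int)) = true := by
        rw [strends_eval n 14 (by norm_num) (by norm_num)]; simp only [decide_eq_true_eq]; split_ifs <;> omega
      rw [show ([19, 18, 17, 16, 15, 14, 13, 12, 11, 10, 9, 8, 7, 6, 5, 4, 3, 2, 1, 0] : List Int) = [19, 18, 17, 16, 15] ++ ((14 : Int) :: [13, 12, 11, 10, 9, 8, 7, 6, 5, 4, 3, 2, 1, 0]) from rfl,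
          faLoop_skip _ _ _ _ _ hskip, faLoop_hit_t _ _ _ _ _ (by norm_num) hhit, if_pos (by omega)]
    · have hskip : ∀ i ∈ ([19, 18, 17, 16, 15, 14] : List Int),
          PySem.Str.endswith (PySem.Int.toStr (n : Int)) (PySem.Int.toStr i) = false := by
        intro i hi
        fin_cases hi <;>
          · rw [strends_eval n _ (by norm_num) (by norm_num)]
            simp only [decide_eq_false_iff_not]
            split_ifs <;> omega
      have hhit : PySem.Str.endswith (PySem.Int.toStr (n : Int)) (PySem.Int.toStr (13 : Int)) = true := by
        rw [strends_eval n 13 (by norm_num) (by norm_num)]; simp only [decide_eq_true_eq]; split_ifs <;> omega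
      rw [show ([19, 18, 17, 16, 15, 14, 13, 12, 11, 10, 9, 8, 7, 6, 5, 4, 3, 2, 1, 0] : List Int) = [19, 18, 17, 16, 15, 14] ++ ((13 : Int) :: [12, 11, 10, 9, 8, 7, 6, 5, 4, 3, 2, 1, 0]) from rfl,
          faLoop_skip _ _ _ _ _ hskip, faLoop_hit_t _ _ _ _ _ (by norm_num) hhit, if_pos (by omega)]
    · have hskip : ∀ i ∈ ([19, 18, 17, 16, 15, 14, 13] : List Int),
          PySem.Str.endswith (PySem.Int.toStr (n : Int)) (PySem.Int.toStr i) = false := by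
        intro i hi
        fin_cases hi <;>
          · rw [strends_eval n _ (by norm_num) (by norm_num)]
            simp only [decide_eq_false_iff_not]
            split_ifs <;> omega
      have hhit : PySem.Str.endswith (PySem.Int.toStr (n : Int)) (PySem.Int.toStr (12 : Int)) = true := by
        rw [strends_eval n 12 (by norm_num) (by norm_num)]; simp only [decide_eq_true_eq]; split_ifs <;> omega
      rw [show ([19, 18, 17, 16, 15, 14, 13, 12, 11, 10, 9, 8, 7, 6, 5, 4, 3, 2, 1, 0] : List Int) = [19, 18, 17, 16, 15, 14, 13] ++ ((12 : Int) :: [11, 10, 9, 8, 7, 6, 5, 4, 3, 2, 1, 0]) from rfl,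
          faLoop_skip _ _ _ _ _ hskip, faLoop_hit_t _ _ _ _ _ (by norm_num) hhit, if_pos (by omega)]
    · have hskip : ∀ i ∈ ([19, 18, 17, 16, 15, 14, 13, 12] : List Int),
          PySem.Str.endswith (PySem.Int.toStr (n : Int)) (PySem.Int.toStr i) = false := by
        intro i hi
        fin_cases hi <;>
          · rw [strends_eval n _ (by norm_num) (by norm_num)]
            simp only [decide_eq_false_iff_not]
            split_ifs <;> omega
      have hhit : PySem.Str.endswith (PySem.Int.toStr (n : Int)) (PySem.Int.toStr (11 : Int)) = true := by
        rw [strends_eval n 11 (by norm_num) (by norm_num)]; simp only [decide_eq_true_eq]; split_ifs <;> omega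
      rw [show ([19, 18, 17, 16, 15, 14, 13, 12, 11, 10, 9, 8, 7, 6, 5, 4, 3, 2, 1, 0] : List Int) = [19, 18, 17, 16, 15, 14, 13, 12] ++ ((11 : Int) :: [10, 9, 8, 7, 6, 5, 4, 3, 2, 1, 0]) from rfl,
          faLoop_skip _ _ _ _ _ hskip, faLoop_hit_t _ _ _ _ _ (by norm_num) hhit, if_pos (by omega)]
    · have hskip : ∀ i ∈ ([19, 18, 17, 16, 15, 14, 13, 12, 11] : List Int),
          PySem.Str.endswith (PySem.Int.toStr (n : Int)) (PySem.Int.toStr i) = false := by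
        intro i hi
        fin_cases hi <;>
          · rw [strends_eval n _ (by norm_num) (by norm_num)]
            simp only [decide_eq_false_iff_not]
            split_ifs <;> omega
      have hhit : PySem.Str.endswith (PySem.Int.toStr (n : Int)) (PySem.Int.toStr (10 : Int)) = true := by
        rw [strends_eval n 10 (by norm_num) (by norm_num)]; simp only [decide_eq_true_eq]; split_ifs <;> omega
      rw [show ([19, 18, 17, 16, 15, 14, 13, 12, 11, 10, 9, 8, 7, 6, 5, 4, 3, 2, 1, 0] : List Int) = [19, 18, 17, 16, 15, 14, 13, 12, 11] ++ ((10 : Int) :: [9, 8, 7, 6, 5, 4, 3, 2, 1, 0]) from rfl,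
          faLoop_skip _ _ _ _ _ hskip, faLoop_hit_t _ _ _ _ _ (by norm_num) hhit, if_pos (by omega)]
  · have hc : n % 10 = 9 ∨ n % 10 = 8 ∨ n % 10 = 7 ∨ n % 10 = 6 ∨ n % 10 = 5 ∨ n % 10 = 4 ∨ n % 10 = 3 ∨ n % 10 = 2 ∨ n % 10 = 1 ∨ n % 10 = 0 := by omega
    rcases hc with h|h|h|h|h|h|h|h|h|h
    · have hskip : ∀ i ∈ ([19, 18, 17, 16, 15, 14, 13, 12, 11, 10] : List Int),
          PySem.Str.endswith (PySem.Int.toStr (n : Int)) (PySem.Int.toStr i) = false := by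
        intro i hi
        fin_cases hi <;>
          · rw [strends_eval n _ (by norm_num) (by norm_num)]
            simp only [decide_eq_false_iff_not]
            split_ifs <;> omega
      have hhit : PySem.Str.endswith (PySem.Int.toStr (n : Int)) (PySem.Int.toStr (9 : Int)) = true := by
        rw [strends_eval n 9 (by norm_num) (by norm_num)]; simp only [decide_eq_true_eq]; split_ifs <;> omega
      rw [show ([19, 18, 17, 16, 15, 14, 13, 12, 11, 10, 9, 8, 7, 6, 5, 4, 3, 2, 1, 0] : List Int) = [19, 18, 17, 16, 15, 14, 13, 12, 11, 10] ++ ((9 : Int) :: [8, 7, 6, 5, 4, 3, 2, 1, 0]) from rfl,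
          faLoop_skip _ _ _ _ _ hskip, faLoop_hit_t _ _ _ _ _ (by norm_num) hhit, if_neg (by omega), if_neg (by omega)]
    · have hskip : ∀ i ∈ ([19, 18, 17, 16, 15, 14, 13, 12, 11, 10, 9] : List Int),
          PySem.Str.endswith (PySem.Int.toStr (n : Int)) (PySem.Int.toStr i) = false := by
        intro i hi
        fin_cases hi <;>
          · rw [strends_eval n _ (by norm_num) (by norm_num)]
            simp only [decide_eq_false_iff_not]
            split_ifs <;> omega
      have hhit : PySem.Str.endswith (PySem.Int.toStr (n : Int)) (PySem.Int.toStr (8 : Int)) = true := by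
        rw [strends_eval n 8 (by norm_num) (by norm_num)]; simp only [decide_eq_true_eq]; split_ifs <;> omega
      rw [show ([19, 18, 17, 16, 15, 14, 13, 12, 11, 10, 9, 8, 7, 6, 5, 4, 3, 2, 1, 0] : List Int) = [19, 18, 17, 16, 15, 14, 13, 12, 11, 10, 9] ++ ((8 : Int) :: [7, 6, 5, 4, 3, 2, 1, 0]) from rfl,
          faLoop_skip _ _ _ _ _ hskip, faLoop_hit_t _ _ _ _ _ (by norm_num) hhit, if_neg (by omega), if_neg (by omega)]
    · have hskip : ∀ i ∈ ([19, 18, 17, 16, 15, 14, 13, 12, 11, 10, 9, 8] : List Int),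
          PySem.Str.endswith (PySem.Int.toStr (n : Int)) (PySem.Int.toStr i) = false := by
        intro i hi
        fin_cases hi <;>
          · rw [strends_eval n _ (by norm_num) (by norm_num)]
            simp only [decide_eq_false_iff_not]
            split_ifs <;> omega
      have hhit : PySem.Str.endswith (PySem.Int.toStr (n : Int)) (PySem.Int.toStr (7 : Int)) = true := by
        rw [strends_eval n 7 (by norm_num) (by norm_num)]; simp only [decide_eq_true_eq]; split_ifs <;> omega
      rw [show ([19, 18, 17, 16, 15, 14, 13, 12, 11, 10, 9, 8, 7, 6, 5, 4, 3, 2, 1, 0] : List Int) = [19, 18, 17, 16, 15, 14, 13, 12, 11, 10, 9, 8] ++ ((7 : Int) :: [6, 5, 4, 3, 2, 1, 0]) from rfl,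
          faLoop_skip _ _ _ _ _ hskip, faLoop_hit_t _ _ _ _ _ (by norm_num) hhit, if_neg (by omega), if_neg (by omega)]
    · have hskip : ∀ i ∈ ([19, 18, 17, 16, 15, 14, 13, 12, 11, 10, 9, 8, 7] : List Int),
          PySem.Str.endswith (PySem.Int.toStr (n : Int)) (PySem.Int.toStr i) = false := by
        intro i hi
        fin_cases hi <;>
          · rw [strends_eval n _ (by norm_num) (by norm_num)]
            simp only [decide_eq_false_iff_not]
            split_ifs <;> omega
      have hhit : PySem.Str.endswith (PySem.Int.toStr (n : Int)) (PySem.Int.toStr (6 : Int)) = true := by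
        rw [strends_eval n 6 (by norm_num) (by norm_num)]; simp only [decide_eq_true_eq]; split_ifs <;> omega
      rw [show ([19, 18, 17, 16, 15, 14, 13, 12, 11, 10, 9, 8, 7, 6, 5, 4, 3, 2, 1, 0] : List Int) = [19, 18, 17, 16, 15, 14, 13, 12, 11, 10, 9, 8, 7] ++ ((6 : Int) :: [5, 4, 3, 2, 1, 0]) from rfl,
          faLoop_skip _ _ _ _ _ hskip, faLoop_hit_t _ _ _ _ _ (by norm_num) hhit, if_neg (by omega), if_neg (by omega)]
    · have hskip : ∀ i ∈ ([19, 18, 17, 16, 15, 14, 13, 12, 11, 10, 9, 8, 7, 6] : List Int),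
          PySem.Str.endswith (PySem.Int.toStr (n : Int)) (PySem.Int.toStr i) = false := by
        intro i hi
        fin_cases hi <;>
          · rw [strends_eval n _ (by norm_num) (by norm_num)]
            simp only [decide_eq_false_iff_not]
            split_ifs <;> omega
      have hhit : PySem.Str.endswith (PySem.Int.toStr (n : Int)) (PySem.Int.toStr (5 : Int)) = true := by
        rw [strends_eval n 5 (by norm_num) (by norm_num)]; simp only [decide_eq_true_eq]; split_ifs <;> omega
      rw [show ([19, 18, 17, 16, 15, 14, 13, 12, 11, 10, 9, 8, 7, 6, 5, 4, 3, 2, 1, 0] : List Int) = [19, 18, 17, 16, 15, 14, 13, 12, 11, 10, 9, 8, 7, 6] ++ ((5 : Int) :: [4, 3, 2, 1, 0]) from rfl,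
          faLoop_skip _ _ _ _ _ hskip, faLoop_hit_t _ _ _ _ _ (by norm_num) hhit, if_neg (by omega), if_neg (by omega)]
    · have hskip : ∀ i ∈ ([19, 18, 17, 16, 15, 14, 13, 12, 11, 10, 9, 8, 7, 6, 5] : List Int),
          PySem.Str.endswith (PySem.Int.toStr (n : Int)) (PySem.Int.toStr i) = false := by
        intro i hi
        fin_cases hi <;>
          · rw [strends_eval n _ (by norm_num) (by norm_num)]
            simp only [decide_eq_false_iff_not]
            split_ifs <;> omega
      have hhit : PySem.Str.endswith (PySem.Int.toStr (n : Int)) (PySem.Int.toStr (4 : Int)) = true := by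
        rw [strends_eval n 4 (by norm_num) (by norm_num)]; simp only [decide_eq_true_eq]; split_ifs <;> omega
      rw [show ([19, 18, 17, 16, 15, 14, 13, 12, 11, 10, 9, 8, 7, 6, 5, 4, 3, 2, 1, 0] : List Int) = [19, 18, 17, 16, 15, 14, 13, 12, 11, 10, 9, 8, 7, 6, 5] ++ ((4 : Int) :: [3, 2, 1, 0]) from rfl,
          faLoop_skip _ _ _ _ _ hskip, faLoop_hit_s _ _ _ _ _ (by norm_num) hhit, if_neg (by omega), if_pos (by omega)]
    · have hskip : ∀ i ∈ ([19, 18, 17, 16, 15, 14, 13, 12, 11, 10, 9, 8, 7, 6, 5, 4] : List Int),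
          PySem.Str.endswith (PySem.Int.toStr (n : Int)) (PySem.Int.toStr i) = false := by
        intro i hi
        fin_cases hi <;>
          · rw [strends_eval n _ (by norm_num) (by norm_num)]
            simp only [decide_eq_false_iff_not]
            split_ifs <;> omega
      have hhit : PySem.Str.endswith (PySem.Int.toStr (n : Int)) (PySem.Int.toStr (3 : Int)) = true := by
        rw [strends_eval n 3 (by norm_num) (by norm_num)]; simp only [decide_eq_true_eq]; split_ifs <;> omega
      rw [show ([19, 18, 17, 16, 15, 14, 13, 12, 11, 10, 9, 8, 7, 6, 5, 4, 3, 2, 1, 0] : List Int) = [19, 18, 17, 16, 15, 14, 13, 12, 11, 10, 9, 8, 7, 6, 5, 4] ++ ((3 : Int) :: [2, 1, 0]) from rfl,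
          faLoop_skip _ _ _ _ _ hskip, faLoop_hit_s _ _ _ _ _ (by norm_num) hhit, if_neg (by omega), if_pos (by omega)]
    · have hskip : ∀ i ∈ ([19, 18, 17, 16, 15, 14, 13, 12, 11, 10, 9, 8, 7, 6, 5, 4, 3] : List Int),
          PySem.Str.endswith (PySem.Int.toStr (n : Int)) (PySem.Int.toStr i) = false := by
        intro i hi
        fin_cases hi <;>
          · rw [strends_eval n _ (by norm_num) (by norm_num)]
            simp only [decide_eq_false_iff_not]
            split_ifs <;> omega
      have hhit : PySem.Str.endswith (PySem.Int.toStr (n : Int)) (PySem.Int.toStr (2 : Int)) = true := by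
        rw [strends_eval n 2 (by norm_num) (by norm_num)]; simp only [decide_eq_true_eq]; split_ifs <;> omega
      rw [show ([19, 18, 17, 16, 15, 14, 13, 12, 11, 10, 9, 8, 7, 6, 5, 4, 3, 2, 1, 0] : List Int) = [19, 18, 17, 16, 15, 14, 13, 12, 11, 10, 9, 8, 7, 6, 5, 4, 3] ++ ((2 : Int) :: [1, 0]) from rfl,
          faLoop_skip _ _ _ _ _ hskip, faLoop_hit_s _ _ _ _ _ (by norm_num) hhit, if_neg (by omega), if_pos (by omega)]
    · have hskip : ∀ i ∈ ([19, 18, 17, 16, 15, 14, 13, 12, 11, 10, 9, 8, 7, 6, 5, 4, 3, 2] : List Int),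
          PySem.Str.endswith (PySem.Int.toStr (n : Int)) (PySem.Int.toStr i) = false := by
        intro i hi
        fin_cases hi <;>
          · rw [strends_eval n _ (by norm_num) (by norm_num)]
            simp only [decide_eq_false_iff_not]
            split_ifs <;> omega
      have hhit : PySem.Str.endswith (PySem.Int.toStr (n : Int)) (PySem.Int.toStr (1 : Int)) = true := by
        rw [strends_eval n 1 (by norm_num) (by norm_num)]; simp only [decide_eq_true_eq]; split_ifs <;> omega
      rw [show ([19, 18, 17, 16, 15, 14, 13, 12, 11, 10, 9, 8, 7, 6, 5, 4, 3, 2, 1, 0] : List Int) = [19, 18, 17, 16, 15, 14, 13, 12, 11, 10, 9, 8, 7, 6, 5, 4, 3, 2] ++ ((1 : Int) :: [0]) from rfl,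
          faLoop_skip _ _ _ _ _ hskip, faLoop_hit_t _ _ _ _ _ (by norm_num) hhit, if_neg (by omega), if_neg (by omega)]
    · have hskip : ∀ i ∈ ([19, 18, 17, 16, 15, 14, 13, 12, 11, 10, 9, 8, 7, 6, 5, 4, 3, 2, 1] : List Int),
          PySem.Str.endswith (PySem.Int.toStr (n : Int)) (PySem.Int.toStr i) = false := by
        intro i hi
        fin_cases hi <;>
          · rw [strends_eval n _ (by norm_num) (by norm_num)]
            simp only [decide_eq_false_iff_not]
            split_ifs <;> omega
      have hhit : PySem.Str.endswith (PySem.Int.toStr (n : Int)) (PySem.Int.toStr (0 : Int)) = true := by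
        rw [strends_eval n 0 (by norm_num) (by norm_num)]; simp only [decide_eq_true_eq]; split_ifs <;> omega
      rw [show ([19, 18, 17, 16, 15, 14, 13, 12, 11, 10, 9, 8, 7, 6, 5, 4, 3, 2, 1, 0] : List Int) = [19, 18, 17, 16, 15, 14, 13, 12, 11, 10, 9, 8, 7, 6, 5, 4, 3, 2, 1] ++ ((0 : Int) :: []) from rfl,
          faLoop_skip _ _ _ _ _ hskip, faLoop_hit_t _ _ _ _ _ (by norm_num) hhit, if_neg (by omega), if_neg (by omega)]

-- A and B agree on every input
lemma format_amount_eq_alt (value : Int) (f s t : String) :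
    format_amount value f s t = format_amount_alt value f s t := by
  unfold format_amount format_amount_alt
  rw [show (if value < 0 then value * (-1) else value) = (if value < 0 then -value else value) from by
    split_ifs <;> ring]
  obtain ⟨n, hn⟩ : ∃ n : Nat, (if value < 0 then -value else value) = (n : Int) :=
    ⟨(if value < 0 then -value else value).toNat, by rw [Int.toNat_of_nonneg (by split_ifs <;> omega)]⟩
  rw [hn]
  by_cases hn1 : n = 1
  · simp [hn1]
  · have hne : ((n : Int) == 1) = false := by simp; omega
    have h100 : PySem.Int.mod (n : Int) 100 = ((n % 100 : Nat) : Int) := by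
      exact_mod_cast PySem.Int.mod_natCast n 100
    have h10 : PySem.Int.mod (n : Int) 10 = ((n % 10 : Nat) : Int) := by
      exact_mod_cast PySem.Int.mod_natCast n 10
    simp only [hne, Bool.false_eq_true, if_false, loop_eval, Option.getD_some, h100, h10,
      Bool.or_eq_true, beq_iff_eq]
    split_ifs <;> first | rfl | omega

-- ===== VERDICT (by name: the statement is the Claim_ definition above) =====
theorem format_amount_spec : Claim_equal_format_amount := by
  intro value first_form second_form third_form _
  unfold Spec_format_amount
  exact format_amount_eq_alt value first_form second_form third_form
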